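-- pv_equiv track=rewrite | github.com/HVFrancis/group-creator | make_groups.py | make_groups
-- ===== SOURCE A (Python) =====
-- def make_groups(students):
--     """Take a list of students and divide them into groups of three or four
--
--
--
--     """
--     size = len(students)
--     no_of_groups = (size + 3) // 4
--     groups = []
--     for i in range (no_of_groups):
--         groups.append([])
--     for i, student in enumerate(students):
--         groups[i % no_of_groups].append(student)
--     for group in groups:
--         group.sort()
--     return groups
-- ===== SOURCE B (Python) =====
-- def make_groups(students):
--     """Take a list of students and divide them into groups of three or four"""
--     students = list(students)
--     no_of_groups = (len(students) + 3) // 4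
--     return [sorted(students[j::no_of_groups]) for j in range(no_of_groups)]
-- ===== Notes on version B (the rewrite author's own statement) =====
-- stated objective: simpler
-- what changed: Inverts the traversal: instead of scattering students one by one into pre-made buckets by index modulo and then sorting each bucket in place, B gathers each group directly as the sorted strided slice students[j::no_of_groups] in a single comprehension over group indices.
import Mathlib
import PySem

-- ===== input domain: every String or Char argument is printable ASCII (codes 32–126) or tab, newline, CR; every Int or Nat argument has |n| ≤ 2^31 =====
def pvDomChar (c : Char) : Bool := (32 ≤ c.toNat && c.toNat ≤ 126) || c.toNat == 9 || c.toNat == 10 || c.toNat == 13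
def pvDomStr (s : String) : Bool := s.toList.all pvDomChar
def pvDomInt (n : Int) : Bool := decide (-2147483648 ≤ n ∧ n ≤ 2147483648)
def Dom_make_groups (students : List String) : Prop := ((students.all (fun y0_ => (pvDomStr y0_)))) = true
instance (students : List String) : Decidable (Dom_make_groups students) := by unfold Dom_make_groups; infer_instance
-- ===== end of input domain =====

-- B gathers each group as the sorted strided slice students[j::n] instead of A's scatter-by-modulo into buckets; return values proved equal (A sorts its sublists in place but does not mutate the argument list itself).

-- ===== PORT A =====
-- scatter: append student i to bucket i % n, then sort each bucket
def make_groups (students : List String) : List (List String) :=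
  let size := students.length
  let n := (size + 3) / 4
  let groups : List (List String) := List.replicate n []
  let groups := students.zipIdx.foldl
    (fun g (p : String × Nat) => g.set (p.2 % n) ((g.getD (p.2 % n) []) ++ [p.1])) groups
  groups.map (fun g => PySem.List.sorted g (fun x => x) false)

-- ===== PORT B =====
-- hand port of the strided slice students[j::n]; exact for 0 ≤ j < n (the only uses):
-- it keeps exactly the elements at positions j, j+n, j+2n, …, i.e. positions ≡ j (mod n)
def pvStride (j n : Nat) (l : List String) : List String :=
  l.zipIdx.filterMap (fun p => if p.2 % n = j then some p.1 else none)

def make_groups_alt (students : List String) : List (List String) :=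
  let n := (students.length + 3) / 4
  (List.range n).map (fun j => PySem.List.sorted (pvStride j n students) (fun x => x) false)

-- ===== PRECONDITION & SPEC =====
def Spec_make_groups (students : List String) (out : List (List String)) : Prop := out = make_groups_alt students
instance (students : List String) (out : List (List String)) : Decidable (Spec_make_groups students out) := by unfold Spec_make_groups; infer_instance

-- ===== CLAIM (what is proved, stated in full; the proofs are below) =====
def Claim_equal_make_groups : Prop := ∀ (students : List String), Dom_make_groups students → Spec_make_groups students (make_groups students)

-- ===== LEMMAS AND PROOFS =====

-- the sublist of l at positions ≡ j (mod n), positions counted from m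
def pvGather (n j : Nat) : Nat → List String → List String
  | _, [] => []
  | m, x :: xs => if m % n = j then x :: pvGather n j (m+1) xs else pvGather n j (m+1) xs

theorem pvStride_eq_gather_aux (n j : Nat) (l : List String) : ∀ m,
    (l.zipIdx m).filterMap (fun p => if p.2 % n = j then some p.1 else none) = pvGather n j m l := by
  induction l with
  | nil => intro m; rfl
  | cons x xs ih =>
    intro m
    simp only [List.zipIdx_cons, List.filterMap_cons, pvGather]
    split_ifs with h <;> simp [ih (m+1)]

theorem pvStride_eq_gather (n j : Nat) (l : List String) : pvStride j n l = pvGather n j 0 l :=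
  pvStride_eq_gather_aux n j l 0

theorem scatter_length (n : Nat) (l : List String) : ∀ (m : Nat) (g : List (List String)),
    ((l.zipIdx m).foldl
      (fun g (p : String × Nat) => g.set (p.2 % n) ((g.getD (p.2 % n) []) ++ [p.1])) g).length
      = g.length := by
  induction l with
  | nil => intro m g; rfl
  | cons x xs ih =>
    intro m g
    simp only [List.zipIdx_cons, List.foldl_cons]
    rw [ih (m+1)]
    simp

theorem scatter_getD (n : Nat) (l : List String) : ∀ (m : Nat) (g : List (List String)),
    g.length = n → ∀ j, j < n →
    ((l.zipIdx m).foldl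
      (fun g (p : String × Nat) => g.set (p.2 % n) ((g.getD (p.2 % n) []) ++ [p.1])) g).getD j []
      = g.getD j [] ++ pvGather n j m l := by
  induction l with
  | nil => intro m g hg j hj; simp [pvGather]
  | cons x xs ih =>
    intro m g hg j hj
    simp only [List.zipIdx_cons, List.foldl_cons, pvGather]
    have hmn : m % n < n := Nat.mod_lt _ (by omega)
    rw [ih (m+1) _ (by simp [hg]) j hj]
    by_cases h : m % n = j
    · simp only [h]
      rw [List.getD_eq_getElem?_getD, List.getElem?_set_self (by omega),
        Option.getD_some, List.getD_eq_getElem?_getD, List.append_assoc]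
      rfl
    · simp only [if_neg h]
      rw [List.getD_eq_getElem?_getD, List.getElem?_set_ne h, ← List.getD_eq_getElem?_getD]

-- ===== VERDICT (by name: the statement is the Claim_ definition above) =====
theorem make_groups_spec : Claim_equal_make_groups := by
  intro students _
  unfold Spec_make_groups make_groups make_groups_alt
  simp only []
  set n := (students.length + 3) / 4 with hn
  have hmm : List.map (fun j => PySem.List.sorted (pvStride j n students) (fun x => x) false) (List.range n)
      = List.map (fun g => PySem.List.sorted g (fun x => x) false) ((List.range n).map (fun j => pvStride j n students)) := by
    rw [List.map_map]
    rfl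
  rw [hmm]
  congr 1
  apply List.ext_getElem
  · rw [scatter_length]; simp
  · intro j hj hj'
    have hjn : j < n := by simpa using hj'
    rw [List.getElem_map, List.getElem_range]
    have hlen : ((students.zipIdx.foldl
        (fun g (p : String × Nat) => g.set (p.2 % n) ((g.getD (p.2 % n) []) ++ [p.1]))
        (List.replicate n []))).length = n := by rw [scatter_length]; simp
    rw [← List.getD_eq_getElem _ [] , List.getD_eq_getElem?_getD]
    have := scatter_getD n students 0 (List.replicate n []) (by simp) j hjn
    rw [List.getD_eq_getElem?_getD] at this
    rw [this]
    simp [pvStride_eq_gather]
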